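-- pv_equiv track=rewrite | github.com/cyberinfidel/Parallax | Code/Logo2Pico8/PNG2PICO8.py | squeeze2to64
-- ===== SOURCE A (Python) =====
-- disable_slash_workaround = False # only needed for 6 bit
--
-- def squeeze2to64(image):
-- 	# 2 bits to 6 bits (64 values) so 3 values per character
-- 	output_string=""
-- 	for i in range(len(image)):
-- 		if i%3==0:
-- 			out=int(image[i])
-- 		elif i%3==1:
-- 			out+=int(image[i])*4
-- 		else:
-- 			out+=int(image[i])*16
-- 			output_string+=encodeChar(out)
-- 	if out>0:	# add any leftovers from non-multiples of 3 input
-- 		output_string += encodeChar(out)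
-- 		# pad with zeros for anything still missing (happens when last values were 0)
-- 		# todo: consider trimming 0 values routinely and pad on expand to save data (why not?)
-- 	while(len(output_string)*3<len(image)):
-- 		output_string+=chr(35)
--
-- 	return output_string
--
-- def encodeChar(val):
-- 	val+=35
-- 	if disable_slash_workaround:
-- 		return chr(val)
-- 	if val>=92:	# skip \
-- 		val+=1
-- 	return chr(val)
-- ===== SOURCE B (Python) =====
-- disable_slash_workaround = False # only needed for 6 bit
--
-- def encodeChar(val):
-- 	val += 35
-- 	if disable_slash_workaround:
-- 		return chr(val)
-- 	if val >= 92:	# skip \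
-- 		val += 1
-- 	return chr(val)
--
-- def squeeze2to64(image):
-- 	# chunk loop: one group of up to three 2-bit values per iteration
-- 	output = ""
-- 	for start in range(0, len(image), 3):
-- 		g = image[start:start + 3]
-- 		out = int(g[0])
-- 		if len(g) > 1:
-- 			out += int(g[1]) * 4
-- 		if len(g) == 3:
-- 			out += int(g[2]) * 16
-- 			output += encodeChar(out)
-- 	if out > 0:	# same leftover re-emit as the original
-- 		output += encodeChar(out)
-- 	while len(output) * 3 < len(image):
-- 		output += chr(35)
-- 	return output
-- ===== Notes on version B (the rewrite author's own statement) =====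
-- stated objective: alternative
-- what changed: Replaces the flat index loop with i%3 branching and carried state by a loop over chunks of three (slice image[start:start+3], combine the up-to-three values at once, emit one char per complete chunk).
import Mathlib
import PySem

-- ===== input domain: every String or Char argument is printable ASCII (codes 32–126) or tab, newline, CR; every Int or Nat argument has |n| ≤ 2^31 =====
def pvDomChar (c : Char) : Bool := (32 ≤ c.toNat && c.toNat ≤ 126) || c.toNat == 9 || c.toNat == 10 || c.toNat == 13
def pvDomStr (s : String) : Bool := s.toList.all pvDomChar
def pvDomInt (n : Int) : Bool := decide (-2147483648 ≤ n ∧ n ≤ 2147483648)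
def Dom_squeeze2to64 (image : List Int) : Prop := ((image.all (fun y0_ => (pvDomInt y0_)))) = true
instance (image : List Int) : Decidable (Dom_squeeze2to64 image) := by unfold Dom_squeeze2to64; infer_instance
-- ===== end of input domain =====

-- B replaces A's flat index loop with i%3 branching by a loop over chunks of three values
-- (objective: alternative decomposition, same cost). Return-value equivalence only; neither mutates.

-- module helper encodeChar (shared by both Python versions; disable_slash_workaround = False)
def pvEncodeChar (val : Int) : List Char :=
  let val := val + 35
  let val := if 92 ≤ val then val + 1 else val
  [Char.ofNat val.toNat]

-- the trailing `while len(output)*3 < len(image): output += chr(35)` loop (identical line in A and B)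
def pvPad (output : List Char) (n : Nat) : List Char :=
  if _h : output.length * 3 < n then pvPad (output ++ ['#']) n else output
termination_by n - output.length * 3
decreasing_by simp only [List.length_append, List.length_cons, List.length_nil]; omega

-- ===== PORT A =====
-- A's `for i in range(len(image))` walking the list with the index counter i and state (output_string, out)
def pvLoopA : List Int → Nat → List Char → Int → List Char × Int
  | [], _, output, out => (output, out)
  | x :: rest, i, output, out =>
    if i % 3 = 0 then pvLoopA rest (i + 1) output x
    else if i % 3 = 1 then pvLoopA rest (i + 1) output (out + x * 4)
    else pvLoopA rest (i + 1) (output ++ pvEncodeChar (out + x * 16)) (out + x * 16)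

def squeeze2to64 (image : List Int) : String :=
  -- Python's `out` is unassigned before the loop; on nonempty input (required by Pre_) iteration
  -- i = 0 assigns it, so the initial 0 below is never read (empty input raises and is outside Pre_)
  let st := pvLoopA image 0 [] 0
  let output := if 0 < st.2 then st.1 ++ pvEncodeChar st.2 else st.1
  String.ofList (pvPad output image.length)

-- ===== PORT B =====
-- B's `for start in range(0, len(image), 3)` with g = image[start:start+3]: each step consumes one
-- chunk of ≤ 3 values; the three branches are Source B's len(g) == 1 / 2 / 3 cases
def pvLoopB : List Int → List Char → Int → List Char × Int
  | [], output, out => (output, out)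
  | [a], output, _ => (output, a)
  | [a, b], output, _ => (output, a + b * 4)
  | a :: b :: c :: rest, output, _ =>
      pvLoopB rest (output ++ pvEncodeChar (a + b * 4 + c * 16)) (a + b * 4 + c * 16)

def squeeze2to64_alt (image : List Int) : String :=
  let st := pvLoopB image [] 0
  let output := if 0 < st.2 then st.1 ++ pvEncodeChar st.2 else st.1
  String.ofList (pvPad output image.length)

-- ===== PRECONDITION & SPEC =====
-- value of the k-th chunk of three (missing entries of a partial last chunk contribute 0)
def pvChunkVal (image : List Int) (k : Nat) : Int :=
  image.getD (3 * k) 0 + 4 * image.getD (3 * k + 1) 0 + 16 * image.getD (3 * k + 2) 0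
-- the character code encodeChar produces for chunk value v
def pvCode (v : Int) : Int := if 92 ≤ v + 35 then v + 36 else v + 35
-- Pre_ excludes the empty list (Python's `out` is unassigned after the loop: UnboundLocalError)
-- and inputs where some encodeChar call gets a value whose code is negative or > 0x10FFFF (chr
-- raises ValueError) or is a UTF-16 surrogate (A returns a lone-surrogate str that a Lean String
-- cannot represent); encodeChar is called on every complete chunk and, when the final value is
-- positive, once more on the final value.
abbrev pvOkCode (v : Int) : Prop :=
  0 ≤ pvCode v ∧ pvCode v ≤ 1114111 ∧ ¬ (55296 ≤ pvCode v ∧ pvCode v < 57344)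
def Pre_squeeze2to64 (image : List Int) : Prop :=
  image ≠ [] ∧ (∀ k < image.length / 3, pvOkCode (pvChunkVal image k)) ∧
    ((image.length % 3 ≠ 0 ∧ 0 < pvChunkVal image (image.length / 3)) →
      pvOkCode (pvChunkVal image (image.length / 3)))
instance (image : List Int) : Decidable (Pre_squeeze2to64 image) := by
  unfold Pre_squeeze2to64; infer_instance

def pvWitness_squeeze2to64 : List Int := [1, 2, 3, 0, 1]

def Spec_squeeze2to64 (image : List Int) (out : String) : Prop := out = squeeze2to64_alt image
instance (image : List Int) (out : String) : Decidable (Spec_squeeze2to64 image out) := by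
  unfold Spec_squeeze2to64; infer_instance

-- ===== CLAIM (what is proved, stated in full; the proofs are below) =====
def Claim_equal_squeeze2to64 : Prop := ∀ (image : List Int), Dom_squeeze2to64 image →
  Pre_squeeze2to64 image → Spec_squeeze2to64 image (squeeze2to64 image)

-- ===== LEMMAS AND PROOFS =====
-- three steps of A's indexed loop starting at i ≡ 0 (mod 3) do exactly one chunk step of B's loop
theorem pvLoop_eq : ∀ (l : List Int) (i : Nat), i % 3 = 0 → ∀ (output : List Char) (out : Int),
    pvLoopA l i output out = pvLoopB l output out
  | [], _, _, _, _ => rfl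
  | [a], i, h, output, out => by simp [pvLoopA, pvLoopB, h]
  | [a, b], i, h, output, out => by
      have h1 : (i + 1) % 3 = 1 := by omega
      simp [pvLoopA, pvLoopB, h, h1]
  | a :: b :: c :: rest, i, h, output, out => by
      have h1 : (i + 1) % 3 = 1 := by omega
      have h2 : (i + 1 + 1) % 3 = 2 := by omega
      have h3 : (i + 1 + 1 + 1) % 3 = 0 := by omega
      simp only [pvLoopA, h, h1, h2, if_true]
      exact pvLoop_eq rest (i + 1 + 1 + 1) h3 _ _

-- ===== VERDICT (by name: the statement is the Claim_ definition above) =====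
theorem squeeze2to64_spec : Claim_equal_squeeze2to64 := by
  intro image _ _
  unfold Spec_squeeze2to64 squeeze2to64 squeeze2to64_alt
  rw [pvLoop_eq image 0 rfl]
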